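-- pv_equiv track=rewrite | github.com/huangzesen/xhelio-pds | src/pdsmcp/fetch.py | _match_collection
-- ===== SOURCE A (Python) =====
-- def _match_collection(urn_name: str, dir_names: list[str]) -> str | None:
--     """Match a URN collection name to an actual directory name.
--
--     Tries: exact match, then hyphen/underscore swap, then fully
--     normalized comparison (strip hyphens/underscores, case-fold).
--
--     Args:
--         urn_name: Collection name from URN.
--         dir_names: Directory names found in the bundle listing.
--
--     Returns:
--         Matched directory name, or ``None``.
--     """
--     # Exact match
--     if urn_name in dir_names:
--         return urn_name
--
--     # Swap hyphens <-> underscores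
--     swapped = urn_name.replace("-", "_")
--     if swapped in dir_names:
--         return swapped
--     swapped = urn_name.replace("_", "-")
--     if swapped in dir_names:
--         return swapped
--
--     # Normalize: strip hyphens/underscores and compare
--     norm = urn_name.replace("-", "").replace("_", "").lower()
--     for d in dir_names:
--         if d.replace("-", "").replace("_", "").lower() == norm:
--             return d
--
--     return None
-- ===== SOURCE B (Python) =====
-- def _match_collection(urn_name: str, dir_names: list[str]) -> str | None:
--     """Single pass: score each directory with a tier (0 exact, 1 swap -> _,
--     2 swap -> -, 3 normalized) and keep the best, first-seen-wins per tier."""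
--     swap1 = urn_name.replace("-", "_")
--     swap2 = urn_name.replace("_", "-")
--     norm = urn_name.replace("-", "").replace("_", "").lower()
--     best_level = 4
--     best_result = None
--     for d in dir_names:
--         if d == urn_name:
--             level, res = 0, urn_name
--         elif d == swap1:
--             level, res = 1, swap1
--         elif d == swap2:
--             level, res = 2, swap2
--         elif d.replace("-", "").replace("_", "").lower() == norm:
--             level, res = 3, d
--         else:
--             continue
--         if level < best_level:
--             best_level, best_result = level, res
--     return best_result
-- ===== Notes on version B (the rewrite author's own statement) =====
-- stated objective: alternative
-- what changed: Replaces A's four separate passes over dir_names (three membership scans plus a final normalized-comparison loop) with a single pass that scores each directory with a match tier and keeps the strictly best tier seen, first occurrence winning within a tier.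
import Mathlib
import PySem

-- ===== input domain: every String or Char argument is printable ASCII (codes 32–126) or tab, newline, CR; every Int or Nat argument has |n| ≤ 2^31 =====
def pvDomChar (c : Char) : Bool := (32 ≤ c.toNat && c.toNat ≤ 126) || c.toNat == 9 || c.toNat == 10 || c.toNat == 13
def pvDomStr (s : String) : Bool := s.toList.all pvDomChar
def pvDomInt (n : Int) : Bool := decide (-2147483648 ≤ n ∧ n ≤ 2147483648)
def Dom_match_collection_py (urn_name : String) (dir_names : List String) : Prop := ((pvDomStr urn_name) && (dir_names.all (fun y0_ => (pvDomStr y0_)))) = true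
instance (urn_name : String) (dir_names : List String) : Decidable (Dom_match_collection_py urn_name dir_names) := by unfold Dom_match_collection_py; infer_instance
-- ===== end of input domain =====

-- B does one pass over dir_names scoring each directory with a match tier instead of A's four passes; same return value everywhere.

-- ===== PORT A =====
-- s.replace("-","").replace("_","").lower()  (shared normalization expression of both Pythons)
def mcNorm (s : String) : String :=
  PySem.Str.lower (PySem.Str.replace (PySem.Str.replace s "-" "") "_" "")

-- A's final for-loop: first d whose normalization equals norm
def mcNormLoop (norm : String) : List String → Option String
  | [] => none
  | d :: rest => if mcNorm d == norm then some d else mcNormLoop norm rest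

def match_collection_py (urn_name : String) (dir_names : List String) : Option String :=
  if dir_names.contains urn_name then some urn_name
  else
    let swapped1 := PySem.Str.replace urn_name "-" "_"
    if dir_names.contains swapped1 then some swapped1
    else
      let swapped2 := PySem.Str.replace urn_name "_" "-"
      if dir_names.contains swapped2 then some swapped2
      else
        mcNormLoop (mcNorm urn_name) dir_names

-- ===== PORT B =====
-- B's single pass: best_level / best_result accumulator, strictly-smaller level wins
def mcLoop (exact sw1 sw2 norm : String) :
    List String → Nat → Option String → Option String
  | [], _, bestResult => bestResult
  | d :: rest, bestLevel, bestResult =>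
    let lr : Option (Nat × String) :=
      if d == exact then some (0, exact)
      else if d == sw1 then some (1, sw1)
      else if d == sw2 then some (2, sw2)
      else if mcNorm d == norm then some (3, d)
      else none
    match lr with
    | none => mcLoop exact sw1 sw2 norm rest bestLevel bestResult
    | some (l, r) =>
      if l < bestLevel then mcLoop exact sw1 sw2 norm rest l (some r)
      else mcLoop exact sw1 sw2 norm rest bestLevel bestResult

def match_collection_py_alt (urn_name : String) (dir_names : List String) : Option String :=
  let swap1 := PySem.Str.replace urn_name "-" "_"
  let swap2 := PySem.Str.replace urn_name "_" "-"
  let norm := mcNorm urn_name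
  mcLoop urn_name swap1 swap2 norm dir_names 4 none

-- ===== PRECONDITION & SPEC =====
def Spec_match_collection_py (urn_name : String) (dir_names : List String) (out : Option String) : Prop := out = match_collection_py_alt urn_name dir_names
instance (urn_name : String) (dir_names : List String) (out : Option String) : Decidable (Spec_match_collection_py urn_name dir_names out) := by unfold Spec_match_collection_py; infer_instance

-- ===== CLAIM (what is proved, stated in full; the proofs are below) =====
def Claim_equal_match_collection_py : Prop := ∀ (urn_name : String) (dir_names : List String), Dom_match_collection_py urn_name dir_names → Spec_match_collection_py urn_name dir_names (match_collection_py urn_name dir_names)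

-- ===== LEMMAS AND PROOFS =====

-- characterization of B's loop for an arbitrary accumulator
theorem mcLoop_eq (exact sw1 sw2 norm : String) (dirs : List String)
    (bl : Nat) (br : Option String) :
    mcLoop exact sw1 sw2 norm dirs bl br =
      if 0 < bl ∧ exact ∈ dirs then some exact
      else if 1 < bl ∧ sw1 ∈ dirs then some sw1
      else if 2 < bl ∧ sw2 ∈ dirs then some sw2
      else if 3 < bl ∧ (mcNormLoop norm dirs).isSome then mcNormLoop norm dirs
      else br := by
  induction dirs generalizing bl br with
  | nil => simp [mcLoop, mcNormLoop]
  | cons d rest ih =>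
    by_cases h0 : d = exact
    · subst h0
      rcases Nat.eq_zero_or_pos bl with h | h
      · subst h; simp [mcLoop, ih]
      · simp [mcLoop, h, ih, List.mem_cons]
    · by_cases h1 : d = sw1
      · subst h1
        by_cases hb : 1 < bl
        · simp [mcLoop, h0, hb, ih, List.mem_cons, Ne.symm h0, (show 0 < bl by omega)]
        · have hbl : bl = 0 ∨ bl = 1 := by omega
          rcases hbl with h | h <;> subst h <;>
            simp [mcLoop, h0, ih, List.mem_cons, Ne.symm h0]
      · by_cases h2 : d = sw2
        · subst h2
          by_cases hb : 2 < bl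
          · simp [mcLoop, h0, h1, hb, ih, List.mem_cons, Ne.symm h0, Ne.symm h1,
              (show 0 < bl by omega), (show 1 < bl by omega)]
          · have hbl : bl = 0 ∨ bl = 1 ∨ bl = 2 := by omega
            rcases hbl with h | h | h <;> subst h <;>
              simp [mcLoop, h0, h1, ih, List.mem_cons, Ne.symm h0, Ne.symm h1]
        · by_cases h3 : mcNorm d = norm
          · by_cases hb : 3 < bl
            · simp [mcLoop, h0, h1, h2, h3, hb, ih, List.mem_cons, mcNormLoop,
                Ne.symm h0, Ne.symm h1, Ne.symm h2,
                (show 0 < bl by omega), (show 1 < bl by omega), (show 2 < bl by omega)]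
            · simp [mcLoop, h0, h1, h2, h3, hb, ih, List.mem_cons, mcNormLoop,
                Ne.symm h0, Ne.symm h1, Ne.symm h2]
          · simp [mcLoop, h0, h1, h2, h3, ih, List.mem_cons, mcNormLoop,
              Ne.symm h0, Ne.symm h1, Ne.symm h2]

-- ===== VERDICT (by name: the statement is the Claim_ definition above) =====
theorem match_collection_py_spec : Claim_equal_match_collection_py := by
  intro urn_name dir_names _
  unfold Spec_match_collection_py match_collection_py match_collection_py_alt
  rw [mcLoop_eq]
  norm_num
  split_ifs with h1 h2 h3 h4 <;> try rfl
  exact Option.not_isSome_iff_eq_none.mp h4
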